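-- pv_equiv track=rewrite | github.com/sposadal1/Assignment-2 | Assignment2.py | automata_then
-- ===== SOURCE A (Python) =====
-- def automata_then(cadena):
--     # Basado en la Fig. 3.14 (Estados 12-17)
--     # Añadimos un espacio para disparar la transición "otro" (Estado 17)
--     temp = cadena + " "
--     estado = 12
--     for c in temp:
--         if estado == 12:
--             if c == 't': estado = 13
--             else: return False
--         elif estado == 13:
--             if c == 'h': estado = 14
--             else: return False
--         elif estado == 14:
--             if c == 'e': estado = 15
--             else: return False
--         elif estado == 15:
--             if c == 'n': estado = 16
--             else: return False
--         elif estado == 16: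
--             # Si lo que sigue NO es letra/número, acepta (Estado 17)
--             if not c.isalnum(): return True
--             else: return False
--     return False
-- ===== SOURCE B (Python) =====
-- def automata_then(cadena):
--     # Closed-form check: accept iff the string starts with "then" and the
--     # character after it (if any) is not alphanumeric.
--     if cadena[:4] != "then":
--         return False
--     if len(cadena) == 4:
--         return True
--     return not cadena[4].isalnum()
-- ===== Notes on version B (the rewrite author's own statement) =====
-- stated objective: simpler
-- what changed: Replaced the 5-state DFA loop with a closed-form check: slice comparison cadena[:4] == "then" plus a single test of the 5th character's isalnum().
import Mathlib
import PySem

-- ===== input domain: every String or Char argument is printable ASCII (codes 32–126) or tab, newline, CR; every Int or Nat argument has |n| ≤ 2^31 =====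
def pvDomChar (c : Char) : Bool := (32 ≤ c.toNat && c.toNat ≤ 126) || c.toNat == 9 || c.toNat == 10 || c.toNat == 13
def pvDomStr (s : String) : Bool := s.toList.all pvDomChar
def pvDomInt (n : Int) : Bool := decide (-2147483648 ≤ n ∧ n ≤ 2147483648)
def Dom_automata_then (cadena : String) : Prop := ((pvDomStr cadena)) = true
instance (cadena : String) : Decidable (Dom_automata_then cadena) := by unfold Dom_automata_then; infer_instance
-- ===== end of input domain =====

-- B replaces A's 5-state DFA loop by a closed-form slice/index check (objective: simpler).

-- ===== PORT A =====
-- the for-loop over temp with the mutable `estado`, one clause per DFA state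
def pvLoopA (estado : Int) : List Char → Bool
  | [] => false
  | c :: rest =>
    if estado = 12 then (if c = 't' then pvLoopA 13 rest else false)
    else if estado = 13 then (if c = 'h' then pvLoopA 14 rest else false)
    else if estado = 14 then (if c = 'e' then pvLoopA 15 rest else false)
    else if estado = 15 then (if c = 'n' then pvLoopA 16 rest else false)
    else if estado = 16 then (if !(PySem.Chars.isalnum c) then true else false)
    else pvLoopA estado rest   -- no matching branch: fall through to the next iteration

def automata_then (cadena : String) : Bool :=
  pvLoopA 12 (cadena.toList ++ [' '])   -- temp = cadena + " "

-- ===== PORT B =====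
def automata_then_alt (cadena : String) : Bool :=
  let l := cadena.toList
  if PySem.Chars.slice l (some 0) (some 4) ≠ "then".toList then false
  else if l.length = 4 then true
  else
    match PySem.Chars.pyGet? l 4 with   -- cadena[4]; in range here since l starts with "then" and |l| ≠ 4
    | some c => !(PySem.Chars.isalnum c)
    | none => false

-- ===== PRECONDITION & SPEC =====
def Spec_automata_then (cadena : String) (out : Bool) : Prop := out = automata_then_alt cadena
instance (cadena : String) (out : Bool) : Decidable (Spec_automata_then cadena out) := by unfold Spec_automata_then; infer_instance

-- ===== CLAIM (what is proved, stated in full; the proofs are below) =====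
def Claim_equal_automata_then : Prop := ∀ (cadena : String), Dom_automata_then cadena → Spec_automata_then cadena (automata_then cadena)

-- ===== LEMMAS AND PROOFS =====
lemma pvSlice4 (xs : List Char) : PySem.List.slice xs none (some 4) = xs.take 4 := by
  rw [PySem.List.slice_to]
  · rfl
  · norm_num

lemma pvGet4 (xs : List Char) : PySem.List.pyGet? xs 4 = xs[4]? := by
  rw [PySem.List.pyGet?_of_nonneg]
  · rfl
  · norm_num

lemma pvIsalnumSpace : PySem.Chars.isalnum ' ' = false := by decide

lemma pvLoop_eq_alt (l : List Char) :
    pvLoopA 12 (l ++ [' ']) =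
      (if PySem.Chars.slice l (some 0) (some 4) ≠ "then".toList then false
       else if l.length = 4 then true
       else
         match PySem.Chars.pyGet? l 4 with
         | some c => !(PySem.Chars.isalnum c)
         | none => false) := by
  rcases l with _ | ⟨a, _ | ⟨b, _ | ⟨c, _ | ⟨d, _ | ⟨e, rest⟩⟩⟩⟩⟩
  · simp [pvLoopA, pvSlice4]
  · by_cases ha : a = 't' <;>
      simp [pvLoopA, pvSlice4, ha]
  · by_cases ha : a = 't' <;> by_cases hb : b = 'h' <;>
      simp [pvLoopA, pvSlice4, ha, hb]
  · by_cases ha : a = 't' <;> by_cases hb : b = 'h' <;> by_cases hc : c = 'e' <;>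
      simp [pvLoopA, pvSlice4, ha, hb, hc]
  · by_cases ha : a = 't' <;> by_cases hb : b = 'h' <;> by_cases hc : c = 'e' <;>
      by_cases hd : d = 'n' <;>
      simp [pvLoopA, pvSlice4, pvIsalnumSpace, ha, hb, hc, hd]
  · by_cases ha : a = 't' <;> by_cases hb : b = 'h' <;> by_cases hc : c = 'e' <;>
      by_cases hd : d = 'n' <;>
      simp [pvLoopA, pvSlice4, pvGet4, ha, hb, hc, hd]

-- ===== VERDICT (by name: the statement is the Claim_ definition above) =====
theorem automata_then_spec : Claim_equal_automata_then := by
  intro cadena _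
  unfold Spec_automata_then automata_then automata_then_alt
  exact pvLoop_eq_alt cadena.toList
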